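-- pv_equiv track=rewrite | github.com/Odiwa4/Advent-of-Code-2024 | 2024/day11/day-11 part 2.py | ChangeStones
-- ===== SOURCE A (Python) =====
-- def ChangeStones(stoneList = {}):
--     newStones = {}
--
--     for i in stoneList.keys():
--         stoneNum = int(i)
--         stoneString = i
--
--         if (stoneString == "0"):
--             newStones.setdefault("1", 0)
--             newStones["1"] += stoneList[stoneString]
--         elif (len(stoneString) % 2 == 0):
--             firstpart  = stoneString[:len(stoneString)//2]
--             secondpart = stoneString[len(stoneString)//2:]
--             newStones.setdefault(firstpart, 0)
--             newStones[firstpart] += stoneList[stoneString]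
--             if (int(secondpart) == 0):
--                 newStones.setdefault("0", 0)
--                 newStones["0"] += stoneList[stoneString]
--             else:
--                 newStones.setdefault(str(int(secondpart)), 0)
--                 newStones[str(int(secondpart))] += stoneList[stoneString]
--         else:
--             newStones.setdefault(str(stoneNum * 2024), 0)
--             newStones[str(stoneNum * 2024)] += stoneList[stoneString]
--     return newStones
-- ===== SOURCE B (Python) =====
-- def ChangeStones(stoneList = {}):
--     # Stage 1: flat list of (produced stone key, source count) pairs.
--     pairs = []
--     for s, c in stoneList.items():
--         if s == "0":
--             pairs.append(("1", c))
--         elif len(s) % 2 == 0: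
--             pairs.append((s[:len(s)//2], c))
--             pairs.append((str(int(s[len(s)//2:])), c))
--         else:
--             pairs.append((str(int(s) * 2024), c))
--     # Stage 2: group by key in first-occurrence order, closed sum per key.
--     keys = list(dict.fromkeys(k for k, _ in pairs))
--     return {k: sum(c for p, c in pairs if p == k) for k in keys}
-- ===== Notes on version B (the rewrite author's own statement) =====
-- stated objective: alternative
-- what changed: A accumulates counts incrementally in one loop with setdefault/+= per branch; B never accumulates into a dict: it first materialises the flat list of produced (key,count) pairs, then dedups the keys in first-occurrence order and builds the result by a closed per-key sum over that list (generate, then group-by-sum).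
import Mathlib
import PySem

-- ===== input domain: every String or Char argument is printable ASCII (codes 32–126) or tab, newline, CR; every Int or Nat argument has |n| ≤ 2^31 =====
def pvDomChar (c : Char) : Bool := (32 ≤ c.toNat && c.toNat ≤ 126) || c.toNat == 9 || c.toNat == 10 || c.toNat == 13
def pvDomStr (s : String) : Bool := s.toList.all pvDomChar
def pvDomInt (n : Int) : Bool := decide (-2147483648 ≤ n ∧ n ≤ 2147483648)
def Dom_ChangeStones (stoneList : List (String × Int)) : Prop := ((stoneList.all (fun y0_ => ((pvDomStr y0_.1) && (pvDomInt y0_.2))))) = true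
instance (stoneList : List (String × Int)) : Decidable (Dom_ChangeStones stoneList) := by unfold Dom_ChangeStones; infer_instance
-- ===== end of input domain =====

-- B replaces A's incremental setdefault/+= dict accumulation by a generate-then-group
-- algorithm: flat produced-pair list, dedup of keys, closed per-key sum (same return value).

-- ===== PORT A =====
def ChangeStones (stoneList : List (String × Int)) : List (String × Int) :=
  let d := PySem.Dict.ofList stoneList
  let newStones := d.keys.foldl
    (fun (ns : PySem.Dict String Int) i =>
      let stoneNum := (PySem.Int.ofStr? i).getD 0   -- int(i); Pre_ excludes the ValueError inputs
      let stoneString := i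
      if stoneString = "0" then
        (ns.setdefault "1" 0).modify "1" 0 (· + d.getD stoneString 0)
      else if PySem.Int.mod (PySem.Str.len stoneString) 2 = 0 then
        let firstpart := PySem.Str.slice stoneString none
          (some (PySem.Int.floordiv (PySem.Str.len stoneString) 2))
        let secondpart := PySem.Str.slice stoneString
          (some (PySem.Int.floordiv (PySem.Str.len stoneString) 2)) none
        let ns1 := (ns.setdefault firstpart 0).modify firstpart 0 (· + d.getD stoneString 0)
        let sec := (PySem.Int.ofStr? secondpart).getD 0   -- int(secondpart); Pre_ excludes the ValueError inputs
        if sec = 0 then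
          (ns1.setdefault "0" 0).modify "0" 0 (· + d.getD stoneString 0)
        else
          (ns1.setdefault (PySem.Int.toStr sec) 0).modify (PySem.Int.toStr sec) 0 (· + d.getD stoneString 0)
      else
        (ns.setdefault (PySem.Int.toStr (stoneNum * 2024)) 0).modify
          (PySem.Int.toStr (stoneNum * 2024)) 0 (· + d.getD stoneString 0))
    PySem.Dict.empty
  newStones.items

-- ===== PORT B =====
def ChangeStones_alt (stoneList : List (String × Int)) : List (String × Int) :=
  -- Stage 1: flat list of (produced stone key, source count) pairs
  let pairs := (PySem.Dict.ofList stoneList).items.foldl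
    (fun (ps : List (String × Int)) p =>
      let s := p.1
      let c := p.2
      if s = "0" then ps ++ [("1", c)]
      else if PySem.Int.mod (PySem.Str.len s) 2 = 0 then
        (ps ++ [(PySem.Str.slice s none (some (PySem.Int.floordiv (PySem.Str.len s) 2)), c)])
          ++ [(PySem.Int.toStr ((PySem.Int.ofStr? (PySem.Str.slice s
                (some (PySem.Int.floordiv (PySem.Str.len s) 2)) none)).getD 0), c)]
      else ps ++ [(PySem.Int.toStr ((PySem.Int.ofStr? s).getD 0 * 2024), c)]) []
  -- Stage 2: keys in first-occurrence order, closed sum per key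
  let keys := PySem.List.dedup (pairs.map (·.1))
  keys.map (fun k => (k, ((pairs.filter (fun q => q.1 == k)).map (·.2)).sum))

-- ===== PRECONDITION & SPEC =====
-- Pre_ excludes exactly the inputs on which Python A raises ValueError: a key that int() cannot
-- parse, or (for a non-"0" even-length key) a second half that int() cannot parse.
def Pre_ChangeStones (stoneList : List (String × Int)) : Prop :=
  ∀ p ∈ stoneList,
    (PySem.Int.ofStr? p.1).isSome = true ∧
    (p.1 ≠ "0" → PySem.Int.mod (PySem.Str.len p.1) 2 = 0 →
      (PySem.Int.ofStr? (PySem.Str.slice p.1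
        (some (PySem.Int.floordiv (PySem.Str.len p.1) 2)) none)).isSome = true)
instance (stoneList : List (String × Int)) : Decidable (Pre_ChangeStones stoneList) := by
  unfold Pre_ChangeStones; infer_instance

def pvWitness_ChangeStones : (List (String × Int)) := [("0", 3), ("12", 1), ("2024", 2)]

def Spec_ChangeStones (stoneList : List (String × Int)) (out : List (String × Int)) : Prop := out = ChangeStones_alt stoneList
instance (stoneList : List (String × Int)) (out : List (String × Int)) : Decidable (Spec_ChangeStones stoneList out) := by unfold Spec_ChangeStones; infer_instance

-- ===== CLAIM (what is proved, stated in full; the proofs are below) =====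
def Claim_equal_ChangeStones : Prop := ∀ (stoneList : List (String × Int)), Dom_ChangeStones stoneList → Pre_ChangeStones stoneList → Spec_ChangeStones stoneList (ChangeStones stoneList)

-- ===== LEMMAS AND PROOFS =====

-- the chunk of produced (key, count) pairs for one source key (proof-only abbreviation)
def chunk (s : String) (c : Int) : List (String × Int) :=
  if s = "0" then [("1", c)]
  else if PySem.Int.mod (PySem.Str.len s) 2 = 0 then
    [(PySem.Str.slice s none (some (PySem.Int.floordiv (PySem.Str.len s) 2)), c),
     (PySem.Int.toStr ((PySem.Int.ofStr? (PySem.Str.slice s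
        (some (PySem.Int.floordiv (PySem.Str.len s) 2)) none)).getD 0), c)]
  else [(PySem.Int.toStr ((PySem.Int.ofStr? s).getD 0 * 2024), c)]

def tallyStep (ns : PySem.Dict String Int) (q : String × Int) : PySem.Dict String Int :=
  ns.insert q.1 (ns.getD q.1 0 + q.2)

-- 'setdefault k 0 then += c' is 'insert k (get(k,0) + c)'
theorem setdefault_modify_eq_insert (d : PySem.Dict String Int) (k : String) (c : Int) :
    (d.setdefault k 0).modify k 0 (· + c) = d.insert k (d.getD k 0 + c) := by
  have hm : ∀ (e : PySem.Dict String Int) (f : Int → Int),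
      e.modify k 0 f = e.insert k (f (e.getD k 0)) := fun _ _ => rfl
  rw [hm, PySem.Dict.getD_setdefault_self]
  by_cases h : d.contains k = true
  · rw [PySem.Dict.setdefault_of_contains (h := h)]
  · rw [PySem.Dict.setdefault_of_not_contains (h := by simpa using h),
      PySem.Dict.insert_insert_self]

-- one loop step of A tallies exactly the chunk of produced pairs
theorem step_eq (ns : PySem.Dict String Int) (i : String) (c : Int) :
    (let stoneNum := (PySem.Int.ofStr? i).getD 0
     if i = "0" then
       (ns.setdefault "1" 0).modify "1" 0 (· + c)
     else if PySem.Int.mod (PySem.Str.len i) 2 = 0 then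
       let firstpart := PySem.Str.slice i none (some (PySem.Int.floordiv (PySem.Str.len i) 2))
       let secondpart := PySem.Str.slice i (some (PySem.Int.floordiv (PySem.Str.len i) 2)) none
       let ns1 := (ns.setdefault firstpart 0).modify firstpart 0 (· + c)
       let sec := (PySem.Int.ofStr? secondpart).getD 0
       if sec = 0 then
         (ns1.setdefault "0" 0).modify "0" 0 (· + c)
       else
         (ns1.setdefault (PySem.Int.toStr sec) 0).modify (PySem.Int.toStr sec) 0 (· + c)
     else
       (ns.setdefault (PySem.Int.toStr (stoneNum * 2024)) 0).modify
         (PySem.Int.toStr (stoneNum * 2024)) 0 (· + c)) =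
    (chunk i c).foldl tallyStep ns := by
  unfold chunk tallyStep
  dsimp only
  by_cases h0 : i = "0"
  · rw [if_pos h0, if_pos h0]
    simp [setdefault_modify_eq_insert]
  rw [if_neg h0, if_neg h0]
  by_cases he : PySem.Int.mod (PySem.Str.len i) 2 = 0
  · rw [if_pos he, if_pos he]
    have ht : PySem.Int.toStr 0 = "0" := by decide
    by_cases hz : (PySem.Int.ofStr? (PySem.Str.slice i
        (some (PySem.Int.floordiv (PySem.Str.len i) 2)) none)).getD 0 = 0
    · rw [if_pos hz, hz, ht]
      simp [setdefault_modify_eq_insert]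
    · rw [if_neg hz]
      simp [setdefault_modify_eq_insert]
  · rw [if_neg he, if_neg he]
    simp [setdefault_modify_eq_insert]

-- the final count of a key is a closed sum over the produced pairs
theorem getD_foldl_tally (l : List (String × Int)) (d : PySem.Dict String Int) (k : String) :
    (l.foldl tallyStep d).getD k 0
      = d.getD k 0 + ((l.filter (fun q => q.1 == k)).map (·.2)).sum := by
  induction l generalizing d with
  | nil => simp
  | cons p t ih =>
    simp only [List.foldl_cons, ih, List.filter_cons]
    by_cases h : p.1 = k
    · simp [tallyStep, h]; ring
    · have hne : (tallyStep d p).getD k 0 = d.getD k 0 := by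
        simp only [tallyStep]
        exact PySem.Dict.getD_insert_of_ne _ _ _ (Ne.symm h)
      simp [hne, h, beq_iff_eq]

-- ===== VERDICT (by name: the statement is the Claim_ definition above) =====
theorem ChangeStones_spec : Claim_equal_ChangeStones := by
  intro stoneList _ _
  unfold Spec_ChangeStones ChangeStones ChangeStones_alt
  dsimp only
  -- B's stage 1 loop is a flatMap of chunks
  have hpairs : ∀ (l : List (String × Int)),
      l.foldl (fun (ps : List (String × Int)) p =>
        if p.1 = "0" then ps ++ [("1", p.2)]
        else if PySem.Int.mod (PySem.Str.len p.1) 2 = 0 then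
          (ps ++ [(PySem.Str.slice p.1 none (some (PySem.Int.floordiv (PySem.Str.len p.1) 2)), p.2)])
            ++ [(PySem.Int.toStr ((PySem.Int.ofStr? (PySem.Str.slice p.1
                  (some (PySem.Int.floordiv (PySem.Str.len p.1) 2)) none)).getD 0), p.2)]
        else ps ++ [(PySem.Int.toStr ((PySem.Int.ofStr? p.1).getD 0 * 2024), p.2)]) []
      = l.flatMap (fun p => chunk p.1 p.2) := by
    intro l
    have hfl := PySem.List.foldl_append_eq_flatMap (l := l) (g := fun p => chunk p.1 p.2) (acc := [])
    simp only [List.nil_append] at hfl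
    have hfun : (fun (ps : List (String × Int)) (p : String × Int) =>
        if p.1 = "0" then ps ++ [("1", p.2)]
        else if PySem.Int.mod (PySem.Str.len p.1) 2 = 0 then
          (ps ++ [(PySem.Str.slice p.1 none (some (PySem.Int.floordiv (PySem.Str.len p.1) 2)), p.2)])
            ++ [(PySem.Int.toStr ((PySem.Int.ofStr? (PySem.Str.slice p.1
                  (some (PySem.Int.floordiv (PySem.Str.len p.1) 2)) none)).getD 0), p.2)]
        else ps ++ [(PySem.Int.toStr ((PySem.Int.ofStr? p.1).getD 0 * 2024), p.2)])
        = fun acc x => acc ++ chunk x.1 x.2 := by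
      funext ps p
      unfold chunk
      split_ifs <;> simp
    rw [hfun, hfl]
  rw [hpairs]
  -- A's loop is the tally fold over the same flatMap
  set d := PySem.Dict.ofList stoneList with hd
  have hnd : d.keys.Nodup := PySem.Dict.nodup_keys_ofList stoneList
  have hA : d.keys.foldl
      (fun (ns : PySem.Dict String Int) i =>
        let stoneNum := (PySem.Int.ofStr? i).getD 0
        if i = "0" then
          (ns.setdefault "1" 0).modify "1" 0 (· + d.getD i 0)
        else if PySem.Int.mod (PySem.Str.len i) 2 = 0 then
          let firstpart := PySem.Str.slice i none (some (PySem.Int.floordiv (PySem.Str.len i) 2))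
          let secondpart := PySem.Str.slice i (some (PySem.Int.floordiv (PySem.Str.len i) 2)) none
          let ns1 := (ns.setdefault firstpart 0).modify firstpart 0 (· + d.getD i 0)
          let sec := (PySem.Int.ofStr? secondpart).getD 0
          if sec = 0 then
            (ns1.setdefault "0" 0).modify "0" 0 (· + d.getD i 0)
          else
            (ns1.setdefault (PySem.Int.toStr sec) 0).modify (PySem.Int.toStr sec) 0 (· + d.getD i 0)
        else
          (ns.setdefault (PySem.Int.toStr (stoneNum * 2024)) 0).modify
            (PySem.Int.toStr (stoneNum * 2024)) 0 (· + d.getD i 0)) PySem.Dict.empty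
      = (d.items.flatMap (fun p => chunk p.1 p.2)).foldl tallyStep PySem.Dict.empty := by
    rw [PySem.Dict.items_eq_map_keys d hnd 0, List.flatMap_map, List.foldl_flatMap]
    have hfun : ∀ (f : String → Int), (fun (ns : PySem.Dict String Int) i =>
        let stoneNum := (PySem.Int.ofStr? i).getD 0
        if i = "0" then
          (ns.setdefault "1" 0).modify "1" 0 (· + f i)
        else if PySem.Int.mod (PySem.Str.len i) 2 = 0 then
          let firstpart := PySem.Str.slice i none (some (PySem.Int.floordiv (PySem.Str.len i) 2))
          let secondpart := PySem.Str.slice i (some (PySem.Int.floordiv (PySem.Str.len i) 2)) none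
          let ns1 := (ns.setdefault firstpart 0).modify firstpart 0 (· + f i)
          let sec := (PySem.Int.ofStr? secondpart).getD 0
          if sec = 0 then
            (ns1.setdefault "0" 0).modify "0" 0 (· + f i)
          else
            (ns1.setdefault (PySem.Int.toStr sec) 0).modify (PySem.Int.toStr sec) 0 (· + f i)
        else
          (ns.setdefault (PySem.Int.toStr (stoneNum * 2024)) 0).modify
            (PySem.Int.toStr (stoneNum * 2024)) 0 (· + f i))
        = fun ns i => (chunk i (f i)).foldl tallyStep ns := by
      intro f
      funext ns i
      exact step_eq ns i (f i)
    rw [hfun (fun i => d.getD i 0)]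
  rw [hA]
  -- the tallied dict's items are the grouped sums over the pair list
  set pairs := d.items.flatMap (fun p => chunk p.1 p.2) with hp
  have hstep : tallyStep = fun (ns : PySem.Dict String Int) (q : String × Int) =>
      ns.insert q.1 ((fun (ns : PySem.Dict String Int) (q : String × Int) =>
        ns.getD q.1 0 + q.2) ns q) := rfl
  have hndk : (pairs.foldl tallyStep PySem.Dict.empty).keys.Nodup := by
    rw [hstep]
    exact PySem.Dict.nodup_keys_foldl_insert_key pairs (·.1) _ _ PySem.Dict.nodup_keys_empty
  have hkeys : (pairs.foldl tallyStep PySem.Dict.empty).keys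
      = PySem.List.dedup (pairs.map (·.1)) := by
    rw [hstep, PySem.Dict.keys_foldl_insert_key, PySem.List.dedup_eq_ofList]
    simp [PySem.Set.update_nil_left]
  rw [PySem.Dict.items_eq_map_keys _ hndk 0, hkeys]
  apply List.map_congr_left
  intro k _
  rw [getD_foldl_tally]
  simp
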